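-- pv_equiv track=rewrite | github.com/open-writing-evaluation/jp_errant_bea | jp_errant/sent_alignment.py | get_paragraphs
-- ===== SOURCE A (Python) =====
-- def match_sent(P1, P2):
--     match_pair = {}
--     multi_match = set()
--     for idx, s in enumerate(P1):
--         if s not in match_pair and s not in multi_match:
--             match_pair[s] = [idx, -1]
--         else:
--             multi_match.add(s)
--             if s in match_pair:
--                 match_pair.pop(s)
--
--     for idx, s in enumerate(P2):
--         if s in match_pair:
--             if match_pair[s][1] == -1 and s not in multi_match:
--                 match_pair[s][1] = idx
--             else:
--                 multi_match.add(s)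
--                 match_pair[s][1] = -1
--
--     match_ids = list()
--     for s, idx in match_pair.items():
--         if idx[0] != -1 and idx[1] != -1:
--             match_ids.append([idx[0], idx[1]])
--     match_ids = sorted(match_ids)
--
--     return match_ids
--
-- def get_paragraphs(sys_sent, gold_sent):
--     sys_sent = [s.strip() for s in sys_sent]
--     gold_sent = [s.strip() for s in gold_sent]
--     match_ids = match_sent(sys_sent, gold_sent)
--
--     i = 0
--     j = 0
--     sys_paragraphs = []
--     gold_paragraphs = []
--     for pair in match_ids:
--         temp_sys = []
--         temp_gold = []
--         while i < pair[0]: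
--             temp_sys.append(sys_sent[i])
--             i += 1
--         while j < pair[1]:
--             temp_gold.append(gold_sent[j])
--             j += 1
--         if len(temp_sys) > 0 or len(temp_gold) > 0:
--             sys_paragraphs.append(temp_sys)
--             gold_paragraphs.append(temp_gold)
--
--         sys_paragraphs.append([sys_sent[pair[0]]])
--         gold_paragraphs.append([gold_sent[pair[1]]])
--         i += 1
--         j += 1
--
--     return sys_paragraphs, gold_paragraphs
-- ===== SOURCE B (Python) =====
-- def get_paragraphs(sys_sent, gold_sent):
--     P1 = [s.strip() for s in sys_sent]
--     P2 = [s.strip() for s in gold_sent]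
--     c1 = {}
--     for s in P1:
--         c1[s] = c1.get(s, 0) + 1
--     c2 = {}
--     pos2 = {}
--     for k, s in enumerate(P2):
--         c2[s] = c2.get(s, 0) + 1
--         pos2.setdefault(s, k)
--     sys_paragraphs = []
--     gold_paragraphs = []
--     pending = []
--     j = 0
--     for s in P1:
--         if c1.get(s, 0) == 1 and c2.get(s, 0) == 1:
--             b = pos2.get(s, 0)
--             gap_gold = P2[j:b]
--             if pending or gap_gold:
--                 sys_paragraphs.append(pending)
--                 gold_paragraphs.append(gap_gold)
--             sys_paragraphs.append([s])
--             gold_paragraphs.append([P2[b]])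
--             pending = []
--             j = max(j, b) + 1
--         else:
--             pending.append(s)
--     return sys_paragraphs, gold_paragraphs
-- ===== Notes on version B (the rewrite author's own statement) =====
-- stated objective: alternative
-- what changed: A buildings a match_pair dict + multi_match set in two passes, harvests and sorts the index pairs, then re-walks both lists with i/j cursors and element-by-element while loops; B fuses matching and segmentation into one pass over the stripped sys list with a pending-paragraph accumulator, using count dicts and a first-position dict, and drops the sort entirely (the anchors are met in increasing sys order, so the sorted pair list is exactly the traversal order).
import Mathlib
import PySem

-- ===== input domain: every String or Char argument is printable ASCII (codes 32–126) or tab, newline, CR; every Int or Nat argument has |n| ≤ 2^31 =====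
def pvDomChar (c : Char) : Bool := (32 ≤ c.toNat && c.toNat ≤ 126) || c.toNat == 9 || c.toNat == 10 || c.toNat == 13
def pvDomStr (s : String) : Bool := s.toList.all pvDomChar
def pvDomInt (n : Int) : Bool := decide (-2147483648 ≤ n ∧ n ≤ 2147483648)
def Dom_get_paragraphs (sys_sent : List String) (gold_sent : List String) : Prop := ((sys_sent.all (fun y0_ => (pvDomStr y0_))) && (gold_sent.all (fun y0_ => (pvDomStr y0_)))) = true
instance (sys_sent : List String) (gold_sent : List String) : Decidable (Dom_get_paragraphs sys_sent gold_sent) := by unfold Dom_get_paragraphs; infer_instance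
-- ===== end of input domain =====

-- B fuses A's three stages (unique-match dict/set passes, sorted pair list, cursor-driven
-- segmentation loop) into ONE pass over the stripped sys list with a pending-paragraph
-- accumulator, count dicts and a first-position dict; no pair list, no sort, no i cursor.

-- ===== PORT A =====

-- Python's sorted() on the [idx1, idx2] pair lists (lexicographic).
def pySortPairs (l : List (Int × Int)) : List (Int × Int) :=
  PySem.List.sorted2 l (·.1) (·.2)

-- first loop body of A's match_sent; state = (match_pair, multi_match);
-- 'match_pair.pop(s)' discards the popped value, so it is Dict.erase
def matchStep1 (st : PySem.Dict String (Int × Int) × PySem.Set String) (p : Int × String) :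
    PySem.Dict String (Int × Int) × PySem.Set String :=
  if !(st.1.contains p.2) && !(st.2.contains p.2) then
    (st.1.insert p.2 (p.1, -1), st.2)
  else
    (if st.1.contains p.2 then st.1.erase p.2 else st.1, st.2.add p.2)

-- second loop body of A's match_sent
def matchStep2 (st : PySem.Dict String (Int × Int) × PySem.Set String) (p : Int × String) :
    PySem.Dict String (Int × Int) × PySem.Set String :=
  match st.1.get? p.2 with
  | some v =>
    if v.2 == -1 && !(st.2.contains p.2) then (st.1.insert p.2 (v.1, p.1), st.2)
    else (st.1.insert p.2 (v.1, -1), st.2.add p.2)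
  | none => st

def match_sent (P1 P2 : List String) : List (Int × Int) :=
  let st1 := (PySem.List.enumerate P1).foldl matchStep1 (PySem.Dict.empty, PySem.Set.empty)
  let st2 := (PySem.List.enumerate P2).foldl matchStep2 st1
  let match_ids := st2.1.items.foldl
    (fun acc kv => if kv.2.1 != -1 && kv.2.2 != -1 then acc ++ [(kv.2.1, kv.2.2)] else acc) []
  pySortPairs match_ids

-- 'while i < bound: temp.append(xs[i]); i += 1'; returns (temp, final i)
-- (xs[i] via pyGetD: in A the index is always in range, the default is never used)
def whileCollect (xs : List String) (i bound : Int) (acc : List String) : List String × Int :=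
  if i < bound then whileCollect xs (i + 1) bound (acc ++ [PySem.List.pyGetD xs i ""])
  else (acc, i)
termination_by (bound - i).toNat
decreasing_by omega

-- body of A's paragraph loop; state = ((i, j), sys_paragraphs, gold_paragraphs)
def segStepA (P1 P2 : List String) (st : (Int × Int) × List (List String) × List (List String))
    (pr : Int × Int) : (Int × Int) × List (List String) × List (List String) :=
  let ti := whileCollect P1 st.1.1 pr.1 []
  let tj := whileCollect P2 st.1.2 pr.2 []
  let sg := if PySem.List.len ti.1 > 0 || PySem.List.len tj.1 > 0
            then (st.2.1 ++ [ti.1], st.2.2 ++ [tj.1]) else st.2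
  ((ti.2 + 1, tj.2 + 1),
   sg.1 ++ [[PySem.List.pyGetD P1 pr.1 ""]], sg.2 ++ [[PySem.List.pyGetD P2 pr.2 ""]])

def get_paragraphs (sys_sent : List String) (gold_sent : List String) :
    List (List String) × List (List String) :=
  let P1 := sys_sent.map PySem.Str.strip
  let P2 := gold_sent.map PySem.Str.strip
  let ids := match_sent P1 P2
  (ids.foldl (segStepA P1 P2) ((0, 0), [], [])).2

-- ===== PORT B =====

-- body of Source B's single fused loop; state = (pending, j, sys_paragraphs, gold_paragraphs).
-- P2[b] via pyGetD: under the count-1 guard b is a valid index, the default is never used.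
def altStep (P2 : List String) (c1 c2 pos2 : PySem.Dict String Int)
    (st : List String × Int × List (List String) × List (List String)) (s : String) :
    List String × Int × List (List String) × List (List String) :=
  if c1.getD s 0 == 1 && c2.getD s 0 == 1 then
    let b := pos2.getD s 0
    let gap_gold := PySem.List.slice P2 (some st.2.1) (some b)
    let sg := if !st.1.isEmpty || !gap_gold.isEmpty
              then (st.2.2.1 ++ [st.1], st.2.2.2 ++ [gap_gold]) else st.2.2
    ([], max st.2.1 b + 1, sg.1 ++ [[s]], sg.2 ++ [[PySem.List.pyGetD P2 b ""]])
  else (st.1 ++ [s], st.2)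

def get_paragraphs_alt (sys_sent : List String) (gold_sent : List String) :
    List (List String) × List (List String) :=
  let P1 := sys_sent.map PySem.Str.strip
  let P2 := gold_sent.map PySem.Str.strip
  let c1 := P1.foldl (fun d s => d.insert s (d.getD s 0 + 1))
      (PySem.Dict.empty : PySem.Dict String Int)
  let cp := (PySem.List.enumerate P2).foldl
      (fun st p => (st.1.insert p.2 (st.1.getD p.2 0 + 1), st.2.setdefault p.2 p.1))
      ((PySem.Dict.empty : PySem.Dict String Int), (PySem.Dict.empty : PySem.Dict String Int))
  (P1.foldl (altStep P2 c1 cp.1 cp.2) ([], 0, [], [])).2.2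

-- ===== PRECONDITION & SPEC =====
def Spec_get_paragraphs (sys_sent : List String) (gold_sent : List String) (out : List (List String) × List (List String)) : Prop := out = get_paragraphs_alt sys_sent gold_sent
instance (sys_sent : List String) (gold_sent : List String) (out : List (List String) × List (List String)) : Decidable (Spec_get_paragraphs sys_sent gold_sent out) := by unfold Spec_get_paragraphs; infer_instance

-- ===== CLAIM (what is proved, stated in full; the proofs are below) =====
def Claim_equal_get_paragraphs : Prop := ∀ (sys_sent : List String) (gold_sent : List String), Dom_get_paragraphs sys_sent gold_sent → Spec_get_paragraphs sys_sent gold_sent (get_paragraphs sys_sent gold_sent)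

-- ===== LEMMAS AND PROOFS =====

def pvF (l : List String) : List (Int × String) :=
  (PySem.List.enumerate l).filter (fun p => l.count p.2 == 1)

def pvVal2 (q : List String) (s : String) : Int :=
  if q.count s == 1 then (q.idxOf s : Int) else -1

def pvDict2 (P1 q : List String) : PySem.Dict String (Int × Int) :=
  ⟨(pvF P1).map (fun p => (p.2, (p.1, pvVal2 q p.2)))⟩

def pvDict1 (pre : List String) : PySem.Dict String (Int × Int) :=
  ⟨(pvF pre).map (fun p => (p.2, (p.1, -1)))⟩

-- the pair list that A sorts (and B never builds): matched (sys index, gold index) in sys order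
def specPairs (P1 P2 : List String) (xs : List String) (k : Int) : List (Int × Int) :=
  ((PySem.List.enumerate xs k).filter
      (fun p => P1.count p.2 == 1 && P2.count p.2 == 1)).map
    (fun p => (p.1, (P2.idxOf p.2 : Int)))

-- slice-and-max form of A's paragraph-loop body (proof-level bridge between the two ports)
def segStepS (P1 P2 : List String) (st : (Int × Int) × List (List String) × List (List String))
    (pr : Int × Int) : (Int × Int) × List (List String) × List (List String) :=
  let ts := PySem.List.slice P1 (some st.1.1) (some pr.1)
  let tg := PySem.List.slice P2 (some st.1.2) (some pr.2)
  let sg := if !ts.isEmpty || !tg.isEmpty then (st.2.1 ++ [ts], st.2.2 ++ [tg]) else st.2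
  ((max st.1.1 pr.1 + 1, max st.1.2 pr.2 + 1),
   sg.1 ++ [[PySem.List.pyGetD P1 pr.1 ""]], sg.2 ++ [[PySem.List.pyGetD P2 pr.2 ""]])

lemma map_snd_enumerate {α : Type} (xs : List α) (s : Int) :
    (PySem.List.enumerate xs s).map (·.2) = xs := by
  induction xs generalizing s with
  | nil => simp [PySem.List.enumerate_nil]
  | cons x t ih => rw [PySem.List.enumerate_cons]; simp [ih]

lemma mem_snd_enumerate {α : Type} {xs : List α} {s : Int} {a : α} :
    a ∈ xs → ∃ p ∈ PySem.List.enumerate xs s, p.2 = a := by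
  intro h
  rw [← map_snd_enumerate xs s] at h
  obtain ⟨p, hp, h2⟩ := List.mem_map.mp h
  exact ⟨p, hp, h2⟩

lemma mem_keys_pvF {l : List String} {s : String} :
    s ∈ (pvF l).map (·.2) ↔ l.count s = 1 := by
  constructor
  · intro h
    obtain ⟨p, hp, rfl⟩ := List.mem_map.mp h
    have := List.of_mem_filter hp
    simpa using this
  · intro h
    have hs : s ∈ l := by
      rw [← List.count_pos_iff]; omega
    obtain ⟨p, hp, hps⟩ := mem_snd_enumerate (s := 0) hs
    exact List.mem_map.mpr ⟨p, List.mem_filter.mpr ⟨hp, by simp [hps, h]⟩, hps⟩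

lemma contains_pvDict1 (pre : List String) (s : String) :
    (pvDict1 pre).contains s = true ↔ pre.count s = 1 := by
  rw [PySem.Dict.contains_iff_mem_keys]
  show s ∈ ((pvF pre).map (fun p => (p.2, (p.1, (-1 : Int))))).map (·.1) ↔ _
  rw [List.map_map, ← mem_keys_pvF]
  rfl

lemma pvF_count_one {P1 : List String} {p : Int × String} (hp : p ∈ pvF P1) :
    P1.count p.2 = 1 := by
  have := List.of_mem_filter hp
  simpa using this

lemma pvF_keys_nodup (P1 : List String) : ((pvF P1).map (·.2)).Nodup := by
  have hsub : ((pvF P1).map (·.2)).Sublist P1 := by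
    have := (List.filter_sublist (l := PySem.List.enumerate P1 0)
        (p := fun p => P1.count p.2 == 1)).map (f := (·.2))
    simpa [pvF, map_snd_enumerate, PySem.List.enumerate] using this
  rw [List.nodup_iff_count_le_one]
  intro a
  by_cases ha : a ∈ (pvF P1).map (·.2)
  · obtain ⟨p, hp, rfl⟩ := List.mem_map.mp ha
    calc List.count p.2 ((pvF P1).map (·.2)) ≤ List.count p.2 P1 := hsub.count_le _
      _ = 1 := pvF_count_one hp
  · simp [List.count_eq_zero_of_not_mem ha]

lemma pvF_unique (P1 : List String) {p p' : Int × String}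
    (hp : p ∈ pvF P1) (hp' : p' ∈ pvF P1) (h : p.2 = p'.2) : p = p' := by
  exact List.inj_on_of_nodup_map (pvF_keys_nodup P1) hp hp' h

lemma contains_pvDict2 (P1 q : List String) (s : String) :
    (pvDict2 P1 q).contains s = true ↔ P1.count s = 1 := by
  rw [PySem.Dict.contains_iff_mem_keys]
  show s ∈ ((pvF P1).map (fun p => (p.2, (p.1, pvVal2 q p.2)))).map (·.1) ↔ _
  rw [List.map_map, ← mem_keys_pvF]
  rfl

lemma mem_enumerate_facts {α : Type} (xs : List α) (s : Int) (p : Int × α)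
    (h : p ∈ PySem.List.enumerate xs s) : p.2 ∈ xs ∧ s ≤ p.1 ∧ p.1 < s + xs.length := by
  induction xs generalizing s with
  | nil => simp [PySem.List.enumerate_nil] at h
  | cons x t ih =>
    rw [PySem.List.enumerate_cons, List.mem_cons] at h
    rcases h with h | h
    · subst h; simp
    · obtain ⟨h1, h2, h3⟩ := ih (s + 1) h
      exact ⟨List.mem_cons_of_mem _ h1, by omega, by simp; omega⟩

lemma enumerate_append_singleton (pre : List String) (s : String) :
    PySem.List.enumerate (pre ++ [s]) 0
      = PySem.List.enumerate pre 0 ++ [((pre.length : Int), s)] := by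
  rw [PySem.List.enumerate_append]
  simp [PySem.List.enumerate_cons, PySem.List.enumerate_nil]

lemma pvF_append_singleton (pre : List String) (s : String) :
    pvF (pre ++ [s]) =
      (PySem.List.enumerate pre 0).filter (fun p => (pre ++ [s]).count p.2 == 1)
        ++ (if pre.count s = 0 then [((pre.length : Int), s)] else []) := by
  unfold pvF
  rw [enumerate_append_singleton, List.filter_append]
  congr 1
  by_cases h : pre.count s = 0 <;>
    simp [List.count_append, h, List.count_singleton] <;> omega

lemma loop1_step (pre : List String) (s : String) (mm : PySem.Set String)
    (hmm : ∀ t, t ∈ mm ↔ 2 ≤ pre.count t) :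
    (matchStep1 (pvDict1 pre, mm) ((pre.length : Int), s)).1 = pvDict1 (pre ++ [s]) ∧
    ∀ t, t ∈ (matchStep1 (pvDict1 pre, mm) ((pre.length : Int), s)).2
      ↔ 2 ≤ (pre ++ [s]).count t := by
  have hcnt : ∀ t, (pre ++ [s]).count t = pre.count t + (if t = s then 1 else 0) := by
    intro t
    rw [List.count_append]
    by_cases h : t = s
    · subst h; simp
    · simp [List.count_singleton, h, Ne.symm h]
  by_cases hc1 : pre.count s = 1
  · -- second occurrence: erase
    have hcont : (pvDict1 pre).contains s = true := (contains_pvDict1 pre s).mpr hc1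
    have hstep : matchStep1 (pvDict1 pre, mm) ((pre.length : Int), s)
        = ((pvDict1 pre).erase s, mm.add s) := by
      simp [matchStep1, hcont]
    rw [hstep]
    constructor
    · show PySem.Dict.erase _ _ = _
      unfold PySem.Dict.erase pvDict1
      congr 1
      show List.filter _ (List.map _ (pvF pre)) = _
      rw [List.filter_map, pvF_append_singleton, if_neg (by omega)]
      unfold pvF
      rw [List.filter_filter, List.append_nil]
      apply congrArg
      apply List.filter_congr
      intro p _
      by_cases h : p.2 = s
      · simp [Function.comp, h, hc1, hcnt, beq_iff_eq]
      · simp [Function.comp, h, hcnt, beq_iff_eq]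
    · intro t
      rw [PySem.Set.mem_add, hmm, hcnt]
      by_cases h : t = s <;> simp [h, hc1] <;> omega
  · by_cases hc0 : pre.count s = 0
    · -- fresh: insert appends
      have hcont : (pvDict1 pre).contains s = false := by
        rw [← Bool.not_eq_true]; intro h
        exact hc1 ((contains_pvDict1 pre s).mp h)
      have hsm : s ∉ mm := fun h => by have := (hmm s).mp h; omega
      have hstep : matchStep1 (pvDict1 pre, mm) ((pre.length : Int), s)
          = ((pvDict1 pre).insert s ((pre.length : Int), -1), mm) := by
        simp [matchStep1, PySem.Set.contains, hcont, hsm]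
      rw [hstep]
      constructor
      · show PySem.Dict.insert _ _ _ = _
        apply PySem.Dict.ext
        rw [PySem.Dict.items_insert_of_not_contains _ _ hcont]
        show List.map _ (pvF pre) ++ _ = List.map _ (pvF (pre ++ [s]))
        rw [pvF_append_singleton, if_pos hc0, List.map_append]
        congr 1
        unfold pvF
        apply congrArg
        apply List.filter_congr
        intro p hp
        have hmem := (mem_enumerate_facts _ _ _ hp).1
        have hne : p.2 ≠ s := by
          intro h; rw [h] at hmem
          rw [← List.count_pos_iff] at hmem; omega
        simp [hcnt, hne]
      · intro t
        rw [hmm, hcnt]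
        by_cases h : t = s <;> simp [h, hc0] <;> omega
    · -- third or later occurrence: already multi
      have hcont : (pvDict1 pre).contains s = false := by
        rw [← Bool.not_eq_true]; intro h
        exact hc1 ((contains_pvDict1 pre s).mp h)
      have hsm : s ∈ mm := (hmm s).mpr (by omega)
      have hstep : matchStep1 (pvDict1 pre, mm) ((pre.length : Int), s)
          = (pvDict1 pre, mm.add s) := by
        simp [matchStep1, PySem.Set.contains, hcont, hsm]
      rw [hstep]
      constructor
      · show pvDict1 pre = pvDict1 (pre ++ [s])
        unfold pvDict1
        congr 1
        rw [pvF_append_singleton, if_neg hc0, List.append_nil]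
        unfold pvF
        apply congrArg
        apply List.filter_congr
        intro p _
        by_cases h : p.2 = s
        · simp [h, hcnt, hc1, beq_iff_eq]; omega
        · simp [h, hcnt, beq_iff_eq]
      · intro t
        rw [PySem.Set.mem_add, hmm, hcnt]
        by_cases h : t = s
        · simp [h]
          rw [← List.count_pos_iff]; omega
        · simp [h]

lemma loop1_main : ∀ (rest pre : List String) (mm : PySem.Set String),
    (∀ t, t ∈ mm ↔ 2 ≤ pre.count t) →
    ((PySem.List.enumerate rest (pre.length : Int)).foldl matchStep1 (pvDict1 pre, mm)).1
        = pvDict1 (pre ++ rest) ∧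
    ∀ t, t ∈ ((PySem.List.enumerate rest (pre.length : Int)).foldl matchStep1 (pvDict1 pre, mm)).2
        ↔ 2 ≤ (pre ++ rest).count t := by
  intro rest
  induction rest with
  | nil =>
    intro pre mm hmm
    simp only [PySem.List.enumerate_nil, List.foldl_nil, List.append_nil]
    exact ⟨trivial, hmm⟩
  | cons r rest' ih =>
    intro pre mm hmm
    rw [PySem.List.enumerate_cons, List.foldl_cons]
    obtain ⟨h1, h2⟩ := loop1_step pre r mm hmm
    have hpair : matchStep1 (pvDict1 pre, mm) ((pre.length : Int), r)
        = (pvDict1 (pre ++ [r]), (matchStep1 (pvDict1 pre, mm) ((pre.length : Int), r)).2) := by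
      rw [← h1]
    rw [hpair]
    have hlen : (pre.length : Int) + 1 = ((pre ++ [r]).length : Int) := by simp
    rw [hlen]
    have := ih (pre ++ [r]) _ h2
    simpa [List.append_assoc] using this

lemma pvVal2_append_ne {q : List String} {s t : String} (h : t ≠ s) :
    pvVal2 (q ++ [s]) t = pvVal2 q t := by
  unfold pvVal2
  have hc : (q ++ [s]).count t = q.count t := by
    rw [List.count_append]; simp [List.count_singleton, Ne.symm h]
  rw [hc]
  by_cases h1 : q.count t = 1
  · have ht : t ∈ q := by rw [← List.count_pos_iff]; omega
    simp [h1, List.idxOf_append_of_mem ht]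
  · simp [h1]

lemma get?_pvDict2 (P1 q : List String) (s : String) :
    (pvDict2 P1 q).get? s
      = ((pvF P1).find? (fun p => p.2 == s)).map (fun p => (p.1, pvVal2 q p.2)) := by
  show Option.map _ (List.find? _ (List.map _ (pvF P1))) = _
  rw [List.find?_map]
  rw [Option.map_map]
  rfl

lemma find?_pvF_none {P1 : List String} {s : String} (h : P1.count s ≠ 1) :
    (pvF P1).find? (fun p => p.2 == s) = none := by
  rw [List.find?_eq_none]
  intro p hp
  have h1 : P1.count p.2 = 1 := by simpa using List.of_mem_filter hp
  simp only [beq_iff_eq]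
  intro he; rw [he] at h1; exact h h1

lemma find?_pvF_some {P1 : List String} {s : String} (h : P1.count s = 1) :
    ∃ p₀, (pvF P1).find? (fun p => p.2 == s) = some p₀ ∧ p₀ ∈ pvF P1 ∧ p₀.2 = s := by
  have hs : s ∈ (pvF P1).map (·.2) := mem_keys_pvF.mpr h
  obtain ⟨p, hp, hps⟩ := List.mem_map.mp hs
  have : ((pvF P1).find? (fun p => p.2 == s)).isSome := by
    rw [List.find?_isSome]
    exact ⟨p, hp, by simp [hps]⟩
  obtain ⟨p₀, hp₀⟩ := Option.isSome_iff_exists.mp this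
  exact ⟨p₀, hp₀, List.mem_of_find?_eq_some hp₀, by simpa using List.find?_some hp₀⟩

lemma insert_pvDict2 {P1 q : List String} {s : String} {p₀ : Int × String}
    (hp₀ : p₀ ∈ pvF P1) (hs : p₀.2 = s) :
    (pvDict2 P1 q).insert s (p₀.1, pvVal2 (q ++ [s]) s) = pvDict2 P1 (q ++ [s]) := by
  have h1 : P1.count s = 1 := by
    have := List.of_mem_filter hp₀; rw [hs] at this; simpa using this
  have hcont : (pvDict2 P1 q).contains s = true := (contains_pvDict2 P1 q s).mpr h1
  apply PySem.Dict.ext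
  rw [PySem.Dict.items_insert_of_contains _ _ hcont]
  show List.map _ (List.map _ (pvF P1)) = List.map _ (pvF P1)
  rw [List.map_map]
  apply List.map_congr_left
  intro p hp
  by_cases h : p.2 = s
  · have hpp : p = p₀ := pvF_unique P1 hp hp₀ (h.trans hs.symm)
    simp [Function.comp, h, hpp, hs]
  · simp [Function.comp, h, pvVal2_append_ne h]

lemma loop2_step (P1 q : List String) (s : String) (mm : PySem.Set String)
    (hmm : ∀ t, P1.count t = 1 → (t ∈ mm ↔ 2 ≤ q.count t)) :
    (matchStep2 (pvDict2 P1 q, mm) ((q.length : Int), s)).1 = pvDict2 P1 (q ++ [s]) ∧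
    ∀ t, P1.count t = 1 →
      ((t ∈ (matchStep2 (pvDict2 P1 q, mm) ((q.length : Int), s)).2) ↔ 2 ≤ (q ++ [s]).count t) := by
  have hcnt : ∀ t, (q ++ [s]).count t = q.count t + (if t = s then 1 else 0) := by
    intro t
    rw [List.count_append]
    by_cases h : t = s
    · subst h; simp
    · simp [h, Ne.symm h]
  by_cases h1 : P1.count s = 1
  · obtain ⟨p₀, hfind, hmem, hs⟩ := find?_pvF_some h1
    have hget : (pvDict2 P1 q).get? s = some (p₀.1, pvVal2 q s) := by
      rw [get?_pvDict2, hfind]; simp [hs]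
    by_cases hc0 : q.count s = 0
    · have hv2 : pvVal2 q s = -1 := by simp [pvVal2, hc0]
      have hsm : s ∉ mm := fun h => by have := (hmm s h1).mp h; omega
      have hval : pvVal2 (q ++ [s]) s = (q.length : Int) := by
        have hnm : s ∉ q := fun h => by rw [← List.count_pos_iff] at h; omega
        simp [pvVal2, hcnt, hc0, List.idxOf_append_of_notMem hnm]
      have hstep : matchStep2 (pvDict2 P1 q, mm) ((q.length : Int), s)
          = ((pvDict2 P1 q).insert s (p₀.1, (q.length : Int)), mm) := by
        simp [matchStep2, hget, hv2, PySem.Set.contains, hsm]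
      rw [hstep]
      refine ⟨by rw [show _ = pvVal2 (q ++ [s]) s from hval.symm]; exact insert_pvDict2 hmem hs, ?_⟩
      intro t ht
      rw [hmm t ht, hcnt]
      by_cases h : t = s
      · subst h; rw [if_pos rfl]; omega
      · simp [h]
    · have hval : pvVal2 (q ++ [s]) s = -1 := by
        have h2 : ((q.count s + 1 : Nat) == 1) = false := by
          simp only [beq_eq_false_iff_ne]; omega
        simp [pvVal2, hcnt, h2]
      have hstep : matchStep2 (pvDict2 P1 q, mm) ((q.length : Int), s)
          = ((pvDict2 P1 q).insert s (p₀.1, -1), mm.add s) := by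
        by_cases hcq : q.count s = 1
        · have hv2 : pvVal2 q s = (q.idxOf s : Int) := by simp [pvVal2, hcq]
          have : (pvVal2 q s == -1) = false := by
            rw [hv2]; simp
          simp [matchStep2, hget, this]
        · have hv2 : pvVal2 q s = -1 := by simp [pvVal2, hcq]
          have hsm : s ∈ mm := (hmm s h1).mpr (by omega)
          simp [matchStep2, hget, hv2, PySem.Set.contains, hsm]
      rw [hstep]
      refine ⟨by rw [show _ = pvVal2 (q ++ [s]) s from hval.symm]; exact insert_pvDict2 hmem hs, ?_⟩
      intro t ht
      rw [PySem.Set.mem_add, hmm t ht, hcnt]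
      by_cases h : t = s
      · subst h
        rw [if_pos rfl]
        simp only [or_true, true_iff]
        omega
      · simp [h]
  · have hget : (pvDict2 P1 q).get? s = none := by
      rw [get?_pvDict2, find?_pvF_none h1]; rfl
    have hstep : matchStep2 (pvDict2 P1 q, mm) ((q.length : Int), s) = (pvDict2 P1 q, mm) := by
      simp [matchStep2, hget]
    rw [hstep]
    constructor
    · show pvDict2 P1 q = pvDict2 P1 (q ++ [s])
      unfold pvDict2
      congr 1
      apply List.map_congr_left
      intro p hp
      have hps : p.2 ≠ s := by
        intro h
        have := List.of_mem_filter hp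
        rw [h] at this; simp at this; exact h1 this
      rw [pvVal2_append_ne hps]
    · intro t ht
      have hts : t ≠ s := fun h => by rw [h] at ht; exact h1 ht
      rw [hmm t ht, hcnt]
      simp [hts]

lemma loop2_main : ∀ (rest q P1 : List String) (mm : PySem.Set String),
    (∀ t, P1.count t = 1 → (t ∈ mm ↔ 2 ≤ q.count t)) →
    ((PySem.List.enumerate rest (q.length : Int)).foldl matchStep2 (pvDict2 P1 q, mm)).1
        = pvDict2 P1 (q ++ rest) := by
  intro rest
  induction rest with
  | nil =>
    intro q P1 mm hmm
    simp only [PySem.List.enumerate_nil, List.foldl_nil, List.append_nil]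
  | cons r rest' ih =>
    intro q P1 mm hmm
    rw [PySem.List.enumerate_cons, List.foldl_cons]
    obtain ⟨h1, h2⟩ := loop2_step P1 q r mm hmm
    have hpair : matchStep2 (pvDict2 P1 q, mm) ((q.length : Int), r)
        = (pvDict2 P1 (q ++ [r]), (matchStep2 (pvDict2 P1 q, mm) ((q.length : Int), r)).2) := by
      rw [← h1]
    rw [hpair]
    have hlen : (q.length : Int) + 1 = ((q ++ [r]).length : Int) := by simp
    rw [hlen]
    have := ih (q ++ [r]) P1 _ h2
    simpa [List.append_assoc] using this

lemma pvVal2_ne_iff (q : List String) (s : String) :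
    ((pvVal2 q s != -1) = true) ↔ q.count s = 1 := by
  unfold pvVal2
  by_cases h : q.count s = 1
  · simp [h]
  · simp [h]

lemma pvDict1_eq_pvDict2_nil (P1 : List String) : pvDict1 P1 = pvDict2 P1 [] := by
  unfold pvDict1 pvDict2
  have : ∀ p : Int × String, (p.2, (p.1, (-1 : Int))) = (p.2, (p.1, pvVal2 [] p.2)) := by
    intro p; simp [pvVal2]
  simp only [this]

lemma match_sent_eq (P1 P2 : List String) :
    match_sent P1 P2 = pySortPairs (specPairs P1 P2 P1 0) := by
  have e0 : ((([] : List String).length : Int)) = 0 := by simp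
  obtain ⟨h1, h2⟩ := loop1_main P1 [] [] (by intro t; simp)
  rw [e0, List.nil_append] at h1 h2
  have hst1 : (PySem.List.enumerate P1 0).foldl matchStep1 (pvDict1 [], ([] : PySem.Set String))
      = (pvDict2 P1 [],
        ((PySem.List.enumerate P1 0).foldl matchStep1 (pvDict1 [], ([] : PySem.Set String))).2) := by
    rw [← pvDict1_eq_pvDict2_nil, ← h1]
  have hmm2 : ∀ t, P1.count t = 1 →
      ((t ∈ ((PySem.List.enumerate P1 0).foldl matchStep1 (pvDict1 [], ([] : PySem.Set String))).2)
        ↔ 2 ≤ ([] : List String).count t) := by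
    intro t ht
    rw [h2]
    simp [ht]
  have h3 := loop2_main P2 [] P1 _ hmm2
  rw [e0, List.nil_append] at h3
  rw [hst1] at h3
  show pySortPairs ((((PySem.List.enumerate P2 0).foldl matchStep2
      ((PySem.List.enumerate P1 0).foldl matchStep1 (pvDict1 [], ([] : PySem.Set String)))).1.items).foldl
      (fun acc kv => if kv.2.1 != -1 && kv.2.2 != -1 then acc ++ [(kv.2.1, kv.2.2)] else acc) [])
    = pySortPairs (specPairs P1 P2 P1 0)
  rw [hst1, h3]
  -- harvest loop = filter + map on the spec items
  rw [PySem.List.foldl_append_if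
    (p := fun kv : String × Int × Int => kv.2.1 != -1 && kv.2.2 != -1)
    (f := fun kv : String × Int × Int => (kv.2.1, kv.2.2))]
  apply congrArg
  rw [List.nil_append]
  show (((pvF P1).map (fun p => (p.2, (p.1, pvVal2 P2 p.2)))).filter _).map _ = _
  rw [List.filter_map, List.map_map]
  unfold specPairs pvF
  rw [List.filter_filter]
  have hflt : ∀ p ∈ PySem.List.enumerate P1 (0 : Int),
      (((fun kv : String × Int × Int => kv.2.1 != -1 && kv.2.2 != -1) ∘
          (fun p : Int × String => (p.2, (p.1, pvVal2 P2 p.2)))) p && (P1.count p.2 == 1))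
        = (P1.count p.2 == 1 && P2.count p.2 == 1) := by
    intro p hp
    have hge : 0 ≤ p.1 := (mem_enumerate_facts P1 0 p hp).2.1
    have hne : (p.1 != -1) = true := by simp; omega
    simp only [Function.comp, hne, Bool.true_and, Bool.and_true]
    by_cases h2c : P2.count p.2 = 1
    · by_cases h1c : P1.count p.2 = 1 <;>
        simp [h1c, h2c, (pvVal2_ne_iff P2 p.2).mpr h2c]
    · have hv : (pvVal2 P2 p.2 != -1) = false := by
        rw [← Bool.not_eq_true]; rw [pvVal2_ne_iff]; exact h2c
      by_cases h1c : P1.count p.2 = 1 <;> simp [h1c, h2c, hv]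
  rw [List.filter_congr hflt]
  apply List.map_congr_left
  intro p hp
  have hpred := List.of_mem_filter hp
  rw [Bool.and_eq_true] at hpred
  obtain ⟨hp1, hp2⟩ := hpred
  have hc2 : P2.count p.2 = 1 := by
    have := beq_iff_eq.mp hp2; exact_mod_cast this
  show ((fun kv : String × Int × Int => (kv.2.1, kv.2.2)) ∘ _) p = _
  have hval : pvVal2 P2 p.2 = (P2.idxOf p.2 : Int) := by simp [pvVal2, hc2]
  simp [Function.comp, hval]

-- A's sorted() is the identity here: the pair list is already strictly increasing in its
-- first component (the sys index), so the stable sort returns it unchanged.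
lemma foldl_insertBy_id {α : Type} (before : α → α → Bool) :
    ∀ (l : List α), l.Pairwise (fun a b => before b a = false) →
      l.foldl (fun acc x => PySem.List.insertBy before x acc) [] = l := by
  intro l
  induction l using List.reverseRecOn with
  | nil => intro _; rfl
  | append_singleton l x ih =>
    intro h
    rw [List.pairwise_append] at h
    rw [List.foldl_append, List.foldl_cons, List.foldl_nil, ih h.1]
    exact PySem.List.insertBy_of_forall_not_before _ _ _
      (fun y hy => h.2.2 y hy x (List.mem_singleton.mpr rfl))

lemma pySortPairs_eq_self (l : List (Int × Int))
    (h : l.Pairwise (fun a b : Int × Int => a.1 < b.1)) : pySortPairs l = l := by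
  show l.foldl (fun acc x => PySem.List.insertBy
      (fun a b : Int × Int =>
        decide (a.1 < b.1) || (!decide (b.1 < a.1) && decide (a.2 < b.2))) x acc) [] = l
  apply foldl_insertBy_id
  refine h.imp ?_
  intro a b hab
  have h1 : ¬ (b.1 < a.1) := by omega
  simp [hab, h1]

lemma specPairs_pairwise (P1 P2 xs : List String) (k : Int) :
    (specPairs P1 P2 xs k).Pairwise (fun a b : Int × Int => a.1 < b.1) := by
  unfold specPairs
  apply List.Pairwise.map
  · intro a b h; exact h
  · exact List.Pairwise.sublist List.filter_sublist (PySem.List.pairwise_lt_enumerate xs k)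

lemma specPairs_bounds (P1 P2 : List String) (pr : Int × Int)
    (h : pr ∈ specPairs P1 P2 P1 0) :
    0 ≤ pr.1 ∧ pr.1 ≤ (P1.length : Int) ∧ 0 ≤ pr.2 ∧ pr.2 ≤ (P2.length : Int) := by
  unfold specPairs at h
  obtain ⟨p, hp, rfl⟩ := List.mem_map.mp h
  have hpe := List.mem_of_mem_filter hp
  obtain ⟨_, hge, hlt⟩ := mem_enumerate_facts P1 0 p hpe
  have hpred := List.of_mem_filter hp
  rw [Bool.and_eq_true] at hpred
  have hc2 : P2.count p.2 = 1 := by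
    have := beq_iff_eq.mp hpred.2; exact_mod_cast this
  have hmem2 : p.2 ∈ P2 := by rw [← List.count_pos_iff]; omega
  have hidx : P2.idxOf p.2 < P2.length := List.idxOf_lt_length_of_mem hmem2
  refine ⟨by omega, by omega, ?_, ?_⟩
  · show (0 : Int) ≤ (P2.idxOf p.2 : Int); positivity
  · show ((P2.idxOf p.2 : Int)) ≤ (P2.length : Int); exact_mod_cast hidx.le

lemma whileCollect_eq (xs : List String) : ∀ (n : Nat) (i a : Int) (acc : List String),
    (a - i).toNat = n → 0 ≤ i → 0 ≤ a → a ≤ (xs.length : Int) →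
    whileCollect xs i a acc
      = (acc ++ (xs.drop i.toNat).take (a.toNat - i.toNat), max i a) := by
  intro n
  induction n with
  | zero =>
    intro i a acc hn hi ha hl
    rw [whileCollect, if_neg (by omega)]
    have h1 : a.toNat - i.toNat = 0 := by omega
    have h2 : max i a = i := by omega
    simp [h1, h2]
  | succ n ih =>
    intro i a acc hn hi ha hl
    have hia : i < a := by omega
    rw [whileCollect, if_pos hia]
    rw [ih (i + 1) a _ (by omega) (by omega) ha hl]
    have hilen : i < (xs.length : Int) := by omega
    have hgd : PySem.List.pyGetD xs i "" = xs[i.toNat] :=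
      PySem.List.pyGetD_eq_getElem xs "" hi hilen
    have hdrop : xs.drop i.toNat = xs[i.toNat] :: xs.drop (i.toNat + 1) :=
      (List.getElem_cons_drop (by omega : i.toNat < xs.length)).symm
    have hmax : max (i + 1) a = max i a := by omega
    have htn : (i + 1).toNat = i.toNat + 1 := by omega
    have htk : a.toNat - i.toNat = (a.toNat - (i.toNat + 1)) + 1 := by omega
    rw [hgd, hmax, htn, htk, hdrop, List.take_succ_cons]
    simp

lemma segStep_eq (P1 P2 : List String) (st : (Int × Int) × List (List String) × List (List String))
    (pr : Int × Int) (h1 : 0 ≤ st.1.1) (h2 : 0 ≤ st.1.2)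
    (hp1 : 0 ≤ pr.1) (hp1' : pr.1 ≤ (P1.length : Int))
    (hp2 : 0 ≤ pr.2) (hp2' : pr.2 ≤ (P2.length : Int)) :
    segStepA P1 P2 st pr = segStepS P1 P2 st pr := by
  unfold segStepA segStepS
  rw [whileCollect_eq P1 _ st.1.1 pr.1 [] rfl h1 hp1 hp1']
  rw [whileCollect_eq P2 _ st.1.2 pr.2 [] rfl h2 hp2 hp2']
  rw [PySem.List.slice_toNat P1 h1 hp1, PySem.List.slice_toNat P2 h2 hp2]
  simp only [List.nil_append]
  generalize (List.take (pr.1.toNat - st.1.1.toNat) (List.drop st.1.1.toNat P1)) = ts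
  generalize (List.take (pr.2.toNat - st.1.2.toNat) (List.drop st.1.2.toNat P2)) = tg
  rcases ts with _ | ⟨x, l⟩ <;> rcases tg with _ | ⟨y, m⟩ <;>
    simp [PySem.List.len]

lemma seg_fold_eq (P1 P2 : List String) : ∀ (prs : List (Int × Int))
    (st : (Int × Int) × List (List String) × List (List String)),
    (∀ pr ∈ prs, 0 ≤ pr.1 ∧ pr.1 ≤ (P1.length : Int) ∧ 0 ≤ pr.2 ∧ pr.2 ≤ (P2.length : Int)) →
    0 ≤ st.1.1 → 0 ≤ st.1.2 →
    prs.foldl (segStepA P1 P2) st = prs.foldl (segStepS P1 P2) st := by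
  intro prs
  induction prs with
  | nil => intro st _ _ _; rfl
  | cons pr rest ih =>
    intro st hb h1 h2
    obtain ⟨hp1, hp1', hp2, hp2'⟩ := hb pr List.mem_cons_self
    rw [List.foldl_cons, List.foldl_cons,
      segStep_eq P1 P2 st pr h1 h2 hp1 hp1' hp2 hp2']
    apply ih
    · intro q hq; exact hb q (List.mem_cons_of_mem _ hq)
    · show 0 ≤ max st.1.1 pr.1 + 1; omega
    · show 0 ≤ max st.1.2 pr.2 + 1; omega

-- the pair fold in B's port splits into two independent folds
lemma foldl_prod :
    ∀ (l : List (Int × String)) (b c : PySem.Dict String Int),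
      l.foldl (fun st p => (st.1.insert p.2 (st.1.getD p.2 0 + 1), st.2.setdefault p.2 p.1)) (b, c)
        = (l.foldl (fun d p => d.insert p.2 (d.getD p.2 0 + 1)) b,
           l.foldl (fun d p => d.setdefault p.2 p.1) c) := by
  intro l
  induction l with
  | nil => intro b c; rfl
  | cons x t ih => intro b c; rw [List.foldl_cons, List.foldl_cons, List.foldl_cons]; exact ih _ _

lemma pos2_skip : ∀ (q : List String) (k : Int) (d : PySem.Dict String Int) (s : String),
    d.contains s = true →
    ((PySem.List.enumerate q k).foldl (fun d p => d.setdefault p.2 p.1) d).get? s = d.get? s := by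
  intro q
  induction q with
  | nil => intro k d s _; simp [PySem.List.enumerate_nil]
  | cons x t ih =>
    intro k d s hc
    rw [PySem.List.enumerate_cons, List.foldl_cons]
    have hc' : (d.setdefault x k).contains s = true := by
      rw [PySem.Dict.contains_setdefault]; simp [hc]
    rw [ih (k + 1) _ s hc']
    by_cases hx : x = s
    · subst hx; rw [PySem.Dict.setdefault_of_contains _ _ hc]
    · exact PySem.Dict.get?_setdefault_of_ne _ _ (fun h => hx h.symm)

lemma pos2_get : ∀ (q : List String) (k : Int) (d : PySem.Dict String Int) (s : String),
    s ∈ q → d.contains s = false →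
    ((PySem.List.enumerate q k).foldl (fun d p => d.setdefault p.2 p.1) d).get? s
      = some (k + (q.idxOf s : Int)) := by
  intro q
  induction q with
  | nil => intro k d s h _; simp at h
  | cons x t ih =>
    intro k d s hs hc
    rw [PySem.List.enumerate_cons, List.foldl_cons]
    by_cases hx : x = s
    · subst hx
      rw [PySem.Dict.setdefault_of_not_contains _ _ hc]
      have hc' : (d.insert x k).contains x = true := PySem.Dict.contains_insert_self d x k
      rw [pos2_skip t _ _ _ hc', PySem.Dict.get?_insert_self]
      simp [List.idxOf_cons_self]
    · have hst : s ∈ t := by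
        rcases List.mem_cons.mp hs with h | h
        · exact absurd h.symm hx
        · exact h
      have hc' : (d.setdefault x k).contains s = false := by
        have hsx : s ≠ x := fun h => hx h.symm
        rw [PySem.Dict.contains_setdefault]
        simp [hc, hsx]
      rw [ih (k + 1) _ s hst hc']
      rw [List.idxOf_cons_ne _ hx]
      congr 1
      push_cast
      omega

-- FUSION: B's single pass over P1 computes the same output as the slice-form pair fold.
lemma fuse (P1 P2 : List String) (c1 c2 pos2 : PySem.Dict String Int)
    (hc1 : ∀ s, c1.getD s 0 = (P1.count s : Int))
    (hc2 : ∀ s, c2.getD s 0 = (P2.count s : Int))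
    (hpos : ∀ s, s ∈ P2 → pos2.getD s 0 = (P2.idxOf s : Int)) :
    ∀ (xs : List String) (k i j : Int) (o : List (List String) × List (List String)),
      0 ≤ i → i ≤ k → xs = P1.drop k.toNat →
      (xs.foldl (altStep P2 c1 c2 pos2)
          ((P1.drop i.toNat).take (k.toNat - i.toNat), j, o)).2.2
        = ((specPairs P1 P2 xs k).foldl (segStepS P1 P2) ((i, j), o)).2 := by
  intro xs
  induction xs with
  | nil => intro k i j o _ _ _; simp [specPairs, PySem.List.enumerate_nil]
  | cons x t ih =>
    intro k i j o hi hik hxs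
    have hklen : k.toNat < P1.length := by
      by_contra h
      rw [List.drop_eq_nil_of_le (by omega)] at hxs
      exact List.cons_ne_nil _ _ hxs
    have h1 : P1[k.toNat]? = some x := by
      rw [← List.head?_drop, ← hxs]; rfl
    have hxk : P1[k.toNat] = x := by
      rw [List.getElem?_eq_getElem hklen] at h1
      exact Option.some.inj h1
    have h1 : P1[k.toNat]? = some x := by
      rw [List.getElem?_eq_getElem hklen, hxk]
    have ht : t = P1.drop (k.toNat + 1) := by
      have h2 := List.tail_drop (l := P1) (i := k.toNat)
      rw [← hxs] at h2
      simpa using h2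
    have hpend : (P1.drop i.toNat).take (k.toNat - i.toNat) ++ [x]
        = (P1.drop i.toNat).take (k.toNat + 1 - i.toNat) := by
      have hval : (P1.drop i.toNat)[k.toNat - i.toNat]? = some x := by
        rw [List.getElem?_drop, show i.toNat + (k.toNat - i.toNat) = k.toNat by omega, h1]
      rw [show k.toNat + 1 - i.toNat = (k.toNat - i.toNat) + 1 by omega,
        List.take_add_one, hval]
      rfl
    rw [List.foldl_cons]
    by_cases hm : P1.count x = 1 ∧ P2.count x = 1
    · -- matched: x is an anchor
      have hg : (c1.getD x 0 == 1 && c2.getD x 0 == 1) = true := by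
        rw [hc1, hc2, hm.1, hm.2]; rfl
      have hxP2 : x ∈ P2 := by rw [← List.count_pos_iff]; omega
      have hb : pos2.getD x 0 = (P2.idxOf x : Int) := hpos x hxP2
      have hstep : altStep P2 c1 c2 pos2
          ((P1.drop i.toNat).take (k.toNat - i.toNat), j, o) x
          = ((P1.drop (k + 1).toNat).take ((k + 1).toNat - (k + 1).toNat),
             max j (P2.idxOf x : Int) + 1,
             (if !((P1.drop i.toNat).take (k.toNat - i.toNat)).isEmpty
                 || !(PySem.List.slice P2 (some j) (some (P2.idxOf x : Int))).isEmpty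
              then (o.1 ++ [(P1.drop i.toNat).take (k.toNat - i.toNat)],
                    o.2 ++ [PySem.List.slice P2 (some j) (some (P2.idxOf x : Int))])
              else o).1 ++ [[x]],
             (if !((P1.drop i.toNat).take (k.toNat - i.toNat)).isEmpty
                 || !(PySem.List.slice P2 (some j) (some (P2.idxOf x : Int))).isEmpty
              then (o.1 ++ [(P1.drop i.toNat).take (k.toNat - i.toNat)],
                    o.2 ++ [PySem.List.slice P2 (some j) (some (P2.idxOf x : Int))])
              else o).2 ++ [[PySem.List.pyGetD P2 (P2.idxOf x : Int) ""]]) := by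
        rw [altStep, if_pos hg, hb]
        have : (k + 1).toNat - (k + 1).toNat = 0 := by omega
        simp [this]
      rw [hstep]
      have hspec : specPairs P1 P2 (x :: t) k
          = (k, (P2.idxOf x : Int)) :: specPairs P1 P2 t (k + 1) := by
        unfold specPairs
        rw [PySem.List.enumerate_cons, List.filter_cons, if_pos (by simp [hm.1, hm.2]),
          List.map_cons]
      rw [hspec, List.foldl_cons]
      have hseg : segStepS P1 P2 ((i, j), o) (k, (P2.idxOf x : Int))
          = ((k + 1, max j (P2.idxOf x : Int) + 1),
             (if !((P1.drop i.toNat).take (k.toNat - i.toNat)).isEmpty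
                 || !(PySem.List.slice P2 (some j) (some (P2.idxOf x : Int))).isEmpty
              then (o.1 ++ [(P1.drop i.toNat).take (k.toNat - i.toNat)],
                    o.2 ++ [PySem.List.slice P2 (some j) (some (P2.idxOf x : Int))])
              else o).1 ++ [[x]],
             (if !((P1.drop i.toNat).take (k.toNat - i.toNat)).isEmpty
                 || !(PySem.List.slice P2 (some j) (some (P2.idxOf x : Int))).isEmpty
              then (o.1 ++ [(P1.drop i.toNat).take (k.toNat - i.toNat)],
                    o.2 ++ [PySem.List.slice P2 (some j) (some (P2.idxOf x : Int))])
              else o).2 ++ [[PySem.List.pyGetD P2 (P2.idxOf x : Int) ""]]) := by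
        rw [segStepS]
        have hsl : PySem.List.slice P1 (some i) (some k)
            = (P1.drop i.toNat).take (k.toNat - i.toNat) :=
          PySem.List.slice_toNat P1 hi (by omega)
        have hanch : PySem.List.pyGetD P1 k "" = x := by
          rw [PySem.List.pyGetD_eq_getElem P1 "" (by omega) (by omega), hxk]
        have hmaxik : max i k = k := by omega
        simp only [hsl, hanch, hmaxik]
      rw [hseg]
      have := ih (k + 1) (k + 1) (max j (P2.idxOf x : Int) + 1)
        ((if !((P1.drop i.toNat).take (k.toNat - i.toNat)).isEmpty
             || !(PySem.List.slice P2 (some j) (some (P2.idxOf x : Int))).isEmpty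
          then (o.1 ++ [(P1.drop i.toNat).take (k.toNat - i.toNat)],
                o.2 ++ [PySem.List.slice P2 (some j) (some (P2.idxOf x : Int))])
          else o).1 ++ [[x]],
         (if !((P1.drop i.toNat).take (k.toNat - i.toNat)).isEmpty
             || !(PySem.List.slice P2 (some j) (some (P2.idxOf x : Int))).isEmpty
          then (o.1 ++ [(P1.drop i.toNat).take (k.toNat - i.toNat)],
                o.2 ++ [PySem.List.slice P2 (some j) (some (P2.idxOf x : Int))])
          else o).2 ++ [[PySem.List.pyGetD P2 (P2.idxOf x : Int) ""]])
        (by omega) (by omega) (by rw [ht]; congr 1; omega)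
      exact this
    · -- unmatched: x joins the pending sys paragraph
      have hg : (c1.getD x 0 == 1 && c2.getD x 0 == 1) = false := by
        rw [hc1, hc2]
        by_cases h1 : P1.count x = 1
        · have h2 : P2.count x ≠ 1 := fun h => hm ⟨h1, h⟩
          simp [h1, h2]
        · simp [h1]
      have hstep : altStep P2 c1 c2 pos2
          ((P1.drop i.toNat).take (k.toNat - i.toNat), j, o) x
          = ((P1.drop i.toNat).take (k.toNat - i.toNat) ++ [x], j, o) := by
        rw [altStep, if_neg (by rw [hg]; exact Bool.false_ne_true)]
      have hspec : specPairs P1 P2 (x :: t) k = specPairs P1 P2 t (k + 1) := by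
        unfold specPairs
        rw [PySem.List.enumerate_cons, List.filter_cons, if_neg ?hneg]
        case hneg =>
          intro h
          rcases Bool.and_eq_true .. |>.mp h with ⟨ha, hb2⟩
          exact hm ⟨by exact_mod_cast beq_iff_eq.mp ha, by exact_mod_cast beq_iff_eq.mp hb2⟩
      rw [hstep, hspec, hpend]
      have := ih (k + 1) i j o hi (by omega) (by rw [ht]; congr 1; omega)
      rw [show (k + 1).toNat = k.toNat + 1 by omega] at this
      exact this

theorem final_eq (sys_sent gold_sent : List String) :
    get_paragraphs sys_sent gold_sent = get_paragraphs_alt sys_sent gold_sent := by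
  rw [get_paragraphs, get_paragraphs_alt]
  rw [match_sent_eq, pySortPairs_eq_self _ (specPairs_pairwise _ _ _ _)]
  rw [seg_fold_eq _ _ _ _ (fun pr hpr => specPairs_bounds _ _ pr hpr) (by norm_num) (by norm_num)]
  rw [foldl_prod]
  have hc1 : ∀ s, ((sys_sent.map PySem.Str.strip).foldl
      (fun d s => d.insert s (d.getD s 0 + 1)) PySem.Dict.empty).getD s 0
      = ((sys_sent.map PySem.Str.strip).count s : Int) := by
    intro s
    rw [PySem.Dict.getD_foldl_insert_add_one, PySem.Dict.getD_empty]
    ring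
  have hc2 : ∀ s, ((PySem.List.enumerate (gold_sent.map PySem.Str.strip)).foldl
      (fun d (p : Int × String) => d.insert p.2 (d.getD p.2 0 + 1)) PySem.Dict.empty).getD s 0
      = ((gold_sent.map PySem.Str.strip).count s : Int) := by
    intro s
    have hm := List.foldl_map (f := (·.2 : Int × String → String))
      (g := fun (d : PySem.Dict String Int) (x : String) => d.insert x (d.getD x 0 + 1))
      (l := PySem.List.enumerate (gold_sent.map PySem.Str.strip))
      (init := (PySem.Dict.empty : PySem.Dict String Int))
    rw [map_snd_enumerate] at hm
    rw [← hm, PySem.Dict.getD_foldl_insert_add_one, PySem.Dict.getD_empty]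
    ring
  have hpos : ∀ s, s ∈ (gold_sent.map PySem.Str.strip) →
      ((PySem.List.enumerate (gold_sent.map PySem.Str.strip)).foldl
        (fun d (p : Int × String) => d.setdefault p.2 p.1) PySem.Dict.empty).getD s 0
      = (((gold_sent.map PySem.Str.strip)).idxOf s : Int) := by
    intro s hs
    rw [PySem.Dict.getD_eq_get?_getD,
      pos2_get _ 0 _ _ hs (PySem.Dict.contains_empty _)]
    simp
  have := fuse (sys_sent.map PySem.Str.strip) (gold_sent.map PySem.Str.strip)
    _ _ _ hc1 hc2 hpos (sys_sent.map PySem.Str.strip) 0 0 0 ([], []) (le_refl 0) (le_refl 0)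
    (by simp)
  simp only [Int.toNat_zero, Nat.sub_zero, List.take_zero, List.drop_zero] at this
  rw [← this]

-- ===== VERDICT (by name: the statement is the Claim_ definition above) =====
theorem get_paragraphs_spec : Claim_equal_get_paragraphs := by
  intro sys_sent gold_sent _
  unfold Spec_get_paragraphs
  exact final_eq sys_sent gold_sent
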